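-- pv_equiv track=rewrite | github.com/ucdavis/iwfm | tests/test_budget_info.py | create_multi_table_budget
-- ===== SOURCE A (Python) =====
-- def create_multi_table_budget(num_tables, header_lines, data_lines, footer_lines):
--     """Create a mock multi-table budget file structure.
--
--     Parameters
--     ----------
--     num_tables : int
--         Number of tables to create
--     header_lines : int
--         Number of header lines per table
--     data_lines : int
--         Number of data lines per table
--     footer_lines : int
--         Number of footer/blank lines between tables
--     """
--     budget_lines = []
--     for t in range(num_tables):
--         # Add header lines
--         for h in range(header_lines):
--             if h == 0:
--                 budget_lines.append(f"                    IWFM Table {t+1}")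
--             else:
--                 budget_lines.append(f"Header line {h} for table {t+1}")
--
--         # Add data lines
--         for d in range(data_lines):
--             month = (d % 12) + 1
--             year = 1973 + (d // 12)
--             budget_lines.append(
--                 f"{month:02d}/{28 if month == 2 else 30}/{year}_24:00       {100.0 + d:.1f}"
--             )
--
--         # Add footer lines (except after last table)
--         if t < num_tables - 1:
--             for f in range(footer_lines):
--                 budget_lines.append("")
--
--     return budget_lines
-- ===== SOURCE B (Python) =====
-- def create_multi_table_budget(num_tables, header_lines, data_lines, footer_lines):
--     """Create a mock multi-table budget file structure.
--
--     Flat-index formulation: the output has a known total length, and the line at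
--     any global index i is computed directly from divmod(i, period) -- no nested
--     per-table loops at all.
--     """
--     H = max(header_lines, 0)
--     D = max(data_lines, 0)
--     F = max(footer_lines, 0)
--     P = H + D + F
--     total = num_tables * (H + D) + (num_tables - 1) * F if num_tables > 0 else 0
--
--     def line(i):
--         t, r = divmod(i, P)
--         if r < H:
--             if r == 0:
--                 return f"                    IWFM Table {t+1}"
--             return f"Header line {r} for table {t+1}"
--         if r < H + D:
--             d = r - H
--             month = (d % 12) + 1
--             year = 1973 + (d // 12)
--             return f"{month:02d}/{28 if month == 2 else 30}/{year}_24:00       {100.0 + d:.1f}"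
--         return ""
--
--     return [line(i) for i in range(total)]
-- ===== Notes on version B (the rewrite author's own statement) =====
-- stated objective: alternative
-- what changed: B replaces A's nested per-table loops with closed-form flat indexing: it computes the exact total number of output lines, and produces the line at each global index i directly from divmod(i, period) (header / data / footer decided by the remainder), so no per-table block construction or last-table footer guard exists.
import Mathlib
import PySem

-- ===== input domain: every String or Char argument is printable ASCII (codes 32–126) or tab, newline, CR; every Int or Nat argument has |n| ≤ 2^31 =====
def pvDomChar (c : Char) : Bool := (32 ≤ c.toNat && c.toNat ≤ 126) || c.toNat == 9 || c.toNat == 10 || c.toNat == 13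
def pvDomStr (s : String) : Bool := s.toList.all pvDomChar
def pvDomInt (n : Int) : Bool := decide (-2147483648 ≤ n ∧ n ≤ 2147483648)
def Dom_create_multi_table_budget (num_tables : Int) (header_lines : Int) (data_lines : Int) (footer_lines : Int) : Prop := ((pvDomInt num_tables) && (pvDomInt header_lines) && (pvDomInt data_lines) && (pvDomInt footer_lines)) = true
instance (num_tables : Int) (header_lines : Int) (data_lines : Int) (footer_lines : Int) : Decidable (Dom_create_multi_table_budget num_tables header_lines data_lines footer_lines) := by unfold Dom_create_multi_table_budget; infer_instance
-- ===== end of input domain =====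

-- B replaces A's nested per-table loops by closed-form flat indexing: it computes the total
-- line count and derives each line directly from divmod(i, period) ('alternative'); same value as A.

-- f"{n:02d}" for 0 ≤ n: zero-pad to two digits (both programs only format months 1..12 with it)
def pvPad2 (n : Int) : String := if n < 10 then "0" ++ PySem.Int.toStr n else PySem.Int.toStr n

-- f"{100.0 + d:.1f}" for 0 ≤ d ≤ 2^31: the float 100.0 + d is exact (< 2^53),
-- so CPython prints str(100 + d) + ".0" — exact on Dom (d comes from range(data_lines)).
def pvVal (d : Int) : String := PySem.Int.toStr (100 + d) ++ ".0"

-- ===== PORT A =====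
def create_multi_table_budget (num_tables : Int) (header_lines : Int) (data_lines : Int) (footer_lines : Int) : List String :=
  (PySem.List.pyRange 0 num_tables 1).foldl (fun budget_lines t =>
    -- header lines
    let budget_lines := (PySem.List.pyRange 0 header_lines 1).foldl (fun acc h =>
      if h = 0 then acc ++ ["                    IWFM Table " ++ PySem.Int.toStr (t + 1)]
      else acc ++ ["Header line " ++ PySem.Int.toStr h ++ " for table " ++ PySem.Int.toStr (t + 1)]) budget_lines
    -- data lines
    let budget_lines := (PySem.List.pyRange 0 data_lines 1).foldl (fun acc d =>
      let month := PySem.Int.mod d 12 + 1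
      let year := 1973 + PySem.Int.floordiv d 12
      acc ++ [pvPad2 month ++ "/" ++ PySem.Int.toStr (if month = 2 then 28 else 30) ++ "/" ++
              PySem.Int.toStr year ++ "_24:00       " ++ pvVal d]) budget_lines
    -- footer lines (except after last table)
    if t < num_tables - 1 then
      (PySem.List.pyRange 0 footer_lines 1).foldl (fun acc _ => acc ++ [""]) budget_lines
    else budget_lines) []

-- ===== PORT B =====
-- Source B's 'line(i)': t, r = divmod(i, P); header / data / footer decided by the remainder r
def pvLine (H D P : Int) (i : Int) : String :=
  if PySem.Int.mod i P < H then
    if PySem.Int.mod i P = 0 then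
      "                    IWFM Table " ++ PySem.Int.toStr (PySem.Int.floordiv i P + 1)
    else
      "Header line " ++ PySem.Int.toStr (PySem.Int.mod i P) ++ " for table " ++
        PySem.Int.toStr (PySem.Int.floordiv i P + 1)
  else if PySem.Int.mod i P < H + D then
    let d := PySem.Int.mod i P - H
    let month := PySem.Int.mod d 12 + 1
    let year := 1973 + PySem.Int.floordiv d 12
    pvPad2 month ++ "/" ++ PySem.Int.toStr (if month = 2 then 28 else 30) ++ "/" ++
      PySem.Int.toStr year ++ "_24:00       " ++ pvVal d
  else ""

def create_multi_table_budget_alt (num_tables : Int) (header_lines : Int) (data_lines : Int) (footer_lines : Int) : List String :=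
  let H := max header_lines 0
  let D := max data_lines 0
  let F := max footer_lines 0
  let P := H + D + F
  let total := if num_tables > 0 then num_tables * (H + D) + (num_tables - 1) * F else 0
  (PySem.List.pyRange 0 total 1).map (pvLine H D P)

-- ===== PRECONDITION & SPEC =====
def Spec_create_multi_table_budget (num_tables : Int) (header_lines : Int) (data_lines : Int) (footer_lines : Int) (out : List String) : Prop := out = create_multi_table_budget_alt num_tables header_lines data_lines footer_lines
instance (num_tables : Int) (header_lines : Int) (data_lines : Int) (footer_lines : Int) (out : List String) : Decidable (Spec_create_multi_table_budget num_tables header_lines data_lines footer_lines out) := by unfold Spec_create_multi_table_budget; infer_instance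

-- ===== CLAIM (what is proved, stated in full; the proofs are below) =====
def Claim_equal_create_multi_table_budget : Prop := ∀ (num_tables : Int) (header_lines : Int) (data_lines : Int) (footer_lines : Int), Dom_create_multi_table_budget num_tables header_lines data_lines footer_lines → Spec_create_multi_table_budget num_tables header_lines data_lines footer_lines (create_multi_table_budget num_tables header_lines data_lines footer_lines)

-- ===== LEMMAS AND PROOFS =====

-- one table's block of A: header lines followed by data lines
def pvTableBlock (header_lines : Int) (data_lines : Int) (t : Int) : List String :=
  ((PySem.List.pyRange 0 header_lines 1).map fun h =>
    if h = 0 then "                    IWFM Table " ++ PySem.Int.toStr (t + 1)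
    else "Header line " ++ PySem.Int.toStr h ++ " for table " ++ PySem.Int.toStr (t + 1))
  ++ ((PySem.List.pyRange 0 data_lines 1).map fun d =>
    pvPad2 (PySem.Int.mod d 12 + 1) ++ "/" ++
    PySem.Int.toStr (if PySem.Int.mod d 12 + 1 = 2 then 28 else 30) ++ "/" ++
    PySem.Int.toStr (1973 + PySem.Int.floordiv d 12) ++ "_24:00       " ++ pvVal d)

-- A's per-table body, starting from acc, produces acc ++ block ++ (conditional footer)
lemma pvA_step (hl dl fl nt : Int) (acc : List String) (t : Int) :
    (let budget_lines := (PySem.List.pyRange 0 hl 1).foldl (fun acc h =>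
        if h = 0 then acc ++ ["                    IWFM Table " ++ PySem.Int.toStr (t + 1)]
        else acc ++ ["Header line " ++ PySem.Int.toStr h ++ " for table " ++ PySem.Int.toStr (t + 1)]) acc
     let budget_lines := (PySem.List.pyRange 0 dl 1).foldl (fun acc d =>
        let month := PySem.Int.mod d 12 + 1
        let year := 1973 + PySem.Int.floordiv d 12
        acc ++ [pvPad2 month ++ "/" ++ PySem.Int.toStr (if month = 2 then 28 else 30) ++ "/" ++
                PySem.Int.toStr year ++ "_24:00       " ++ pvVal d]) budget_lines
     if t < nt - 1 then
        (PySem.List.pyRange 0 fl 1).foldl (fun acc _ => acc ++ [""]) budget_lines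
     else budget_lines)
    = acc ++ pvTableBlock hl dl t ++
        (if t < nt - 1 then List.replicate fl.toNat "" else []) := by
  have h1 : ((PySem.List.pyRange 0 hl 1).foldl (fun acc h =>
        if h = 0 then acc ++ ["                    IWFM Table " ++ PySem.Int.toStr (t + 1)]
        else acc ++ ["Header line " ++ PySem.Int.toStr h ++ " for table " ++ PySem.Int.toStr (t + 1)]) acc)
      = acc ++ (PySem.List.pyRange 0 hl 1).map (fun h =>
          if h = 0 then "                    IWFM Table " ++ PySem.Int.toStr (t + 1)
          else "Header line " ++ PySem.Int.toStr h ++ " for table " ++ PySem.Int.toStr (t + 1)) := by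
    rw [show (fun (acc : List String) (h : Int) =>
        if h = 0 then acc ++ ["                    IWFM Table " ++ PySem.Int.toStr (t + 1)]
        else acc ++ ["Header line " ++ PySem.Int.toStr h ++ " for table " ++ PySem.Int.toStr (t + 1)])
      = (fun acc h => acc ++ [if h = 0 then "                    IWFM Table " ++ PySem.Int.toStr (t + 1)
        else "Header line " ++ PySem.Int.toStr h ++ " for table " ++ PySem.Int.toStr (t + 1)]) from by
        funext a h; split <;> rfl]
    exact PySem.List.foldl_append_singleton_eq_map _ _ _
  have h2 : ∀ (a : List String), ((PySem.List.pyRange 0 dl 1).foldl (fun acc d =>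
        let month := PySem.Int.mod d 12 + 1
        let year := 1973 + PySem.Int.floordiv d 12
        acc ++ [pvPad2 month ++ "/" ++ PySem.Int.toStr (if month = 2 then 28 else 30) ++ "/" ++
                PySem.Int.toStr year ++ "_24:00       " ++ pvVal d]) a)
      = a ++ (PySem.List.pyRange 0 dl 1).map (fun d =>
          pvPad2 (PySem.Int.mod d 12 + 1) ++ "/" ++
          PySem.Int.toStr (if PySem.Int.mod d 12 + 1 = 2 then 28 else 30) ++ "/" ++
          PySem.Int.toStr (1973 + PySem.Int.floordiv d 12) ++ "_24:00       " ++ pvVal d) := fun a =>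
    PySem.List.foldl_append_singleton_eq_map _ _ _
  have h3 : ∀ (a : List String), ((PySem.List.pyRange 0 fl 1).foldl (fun acc (_ : Int) => acc ++ [""]) a)
      = a ++ List.replicate fl.toNat "" := by
    intro a
    show List.foldl (fun acc x => acc ++ [(fun (_ : Int) => "") x]) a (PySem.List.pyRange 0 fl 1) = _
    rw [PySem.List.foldl_append_singleton_eq_map, List.map_const', PySem.List.length_pyRange_one]
    simp
  show (if t < nt - 1 then _ else _) = _
  rw [h1, h2, h3]
  unfold pvTableBlock
  split <;> simp [List.append_assoc]

-- the whole table loop of A, as a flatMap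
lemma pvA_fold (hl dl fl nt : Int) (l : List Int) (acc : List String) :
    List.foldl (fun (budget_lines : List String) (t : Int) =>
      let budget_lines := (PySem.List.pyRange 0 hl 1).foldl (fun acc h =>
        if h = 0 then acc ++ ["                    IWFM Table " ++ PySem.Int.toStr (t + 1)]
        else acc ++ ["Header line " ++ PySem.Int.toStr h ++ " for table " ++ PySem.Int.toStr (t + 1)]) budget_lines
      let budget_lines := (PySem.List.pyRange 0 dl 1).foldl (fun acc d =>
        let month := PySem.Int.mod d 12 + 1
        let year := 1973 + PySem.Int.floordiv d 12
        acc ++ [pvPad2 month ++ "/" ++ PySem.Int.toStr (if month = 2 then 28 else 30) ++ "/" ++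
                PySem.Int.toStr year ++ "_24:00       " ++ pvVal d]) budget_lines
      if t < nt - 1 then
        (PySem.List.pyRange 0 fl 1).foldl (fun acc _ => acc ++ [""]) budget_lines
      else budget_lines) acc l
    = acc ++ l.flatMap (fun t => pvTableBlock hl dl t ++
        (if t < nt - 1 then List.replicate fl.toNat "" else [])) := by
  induction l generalizing acc with
  | nil => simp
  | cons x xs ih =>
    rw [List.foldl_cons, ih, pvA_step hl dl fl nt acc x]
    simp [List.append_assoc]

-- flatten with a trailing separator after every block
def pvG (hl dl fl : Int) (n : Nat) : List String :=
  (PySem.List.pyRange 0 ((n : Nat) : Int) 1).flatMap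
    (fun t => pvTableBlock hl dl t ++ List.replicate fl.toNat "")

-- A on m+1 tables: all blocks with trailing footers, then the last block without one
lemma pvA_eq (hl dl fl : Int) (m : Nat) :
    create_multi_table_budget ((m + 1 : Nat) : Int) hl dl fl
      = pvG hl dl fl m ++ pvTableBlock hl dl (m : Int) := by
  unfold create_multi_table_budget
  rw [pvA_fold hl dl fl ((m + 1 : Nat) : Int), List.nil_append]
  rw [show ((m + 1 : Nat) : Int) = (m : Int) + 1 by push_cast; ring]
  rw [PySem.List.pyRange_one_succ_right (by positivity), List.flatMap_append]
  rw [List.flatMap_congr (l := PySem.List.pyRange 0 (m : Int) 1)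
    (g := fun t => pvTableBlock hl dl t ++ List.replicate fl.toNat "")
    (by
      intro t ht
      have hm := (PySem.List.mem_pyRange_one.mp ht).2
      rw [if_pos (by omega)])]
  simp only [List.flatMap_cons, List.flatMap_nil]
  rw [if_neg (show ¬((m : Int) < (m : Int) + 1 - 1) by omega)]
  simp [pvG]

-- a range with a possibly-negative upper bound equals the clamped one
lemma pvRange_max (a : Int) : PySem.List.pyRange 0 a 1 = PySem.List.pyRange 0 (max a 0) 1 := by
  by_cases h : a ≤ 0
  · rw [PySem.List.pyRange_one_eq_nil h, PySem.List.pyRange_one_eq_nil (by omega)]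
  · rw [max_eq_left (by omega)]

-- divmod of an index inside table t's period
lemma pvDivmod (P t r : Int) (hP : 0 < P) (hr0 : 0 ≤ r) (hrP : r < P) :
    PySem.Int.floordiv (t * P + r) P = t ∧ PySem.Int.mod (t * P + r) P = r := by
  have hd : PySem.Int.floordiv (t * P + r) P = t := by
    rw [PySem.Int.floordiv_eq_iff_of_pos hP]
    constructor <;> nlinarith
  refine ⟨hd, ?_⟩
  have := PySem.Int.floordiv_mul_add_mod (t * P + r) P
  rw [hd] at this
  omega

-- pvLine on the segment [t*P+lo, t*P+hi) computes the in-table line at offsets [lo, hi)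
lemma pvLine_seg (H D F t lo hi : Int)
    (hlo : 0 ≤ lo) (hhi : hi ≤ H + D + F) :
    (PySem.List.pyRange (t * (H + D + F) + lo) (t * (H + D + F) + hi) 1).map
        (pvLine H D (H + D + F))
      = (PySem.List.pyRange lo hi 1).map (fun r =>
          if r < H then
            if r = 0 then "                    IWFM Table " ++ PySem.Int.toStr (t + 1)
            else "Header line " ++ PySem.Int.toStr r ++ " for table " ++ PySem.Int.toStr (t + 1)
          else if r < H + D then
            pvPad2 (PySem.Int.mod (r - H) 12 + 1) ++ "/" ++
            PySem.Int.toStr (if PySem.Int.mod (r - H) 12 + 1 = 2 then 28 else 30) ++ "/" ++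
            PySem.Int.toStr (1973 + PySem.Int.floordiv (r - H) 12) ++ "_24:00       " ++ pvVal (r - H)
          else "") := by
  by_cases hP : 0 < H + D + F
  case neg =>
    rw [PySem.List.pyRange_one_eq_nil (by omega), PySem.List.pyRange_one_eq_nil (by omega)]
    rfl
  rw [PySem.List.pyRange_one, PySem.List.pyRange_one, List.map_map, List.map_map]
  rw [show (t * (H + D + F) + hi - (t * (H + D + F) + lo)).toNat = (hi - lo).toNat by omega]
  apply List.map_congr_left
  intro k hk
  have hk' : (k : Int) < hi - lo := by
    have := List.mem_range.mp hk; omega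
  have hr0 : 0 ≤ lo + (k : Int) := by omega
  have hrP : lo + (k : Int) < H + D + F := by omega
  obtain ⟨hdiv, hmod⟩ := pvDivmod (H + D + F) t (lo + (k : Int)) hP hr0 hrP
  simp only [Function.comp]
  rw [show t * (H + D + F) + lo + (k : Int) = t * (H + D + F) + (lo + (k : Int)) by ring] at *
  simp only [pvLine, hdiv, hmod]

-- the block segment [t*P, t*P+H+D) of B is exactly A's table block
lemma pvSegBlock (hl dl fl t : Int) :
    (PySem.List.pyRange (t * (max hl 0 + max dl 0 + max fl 0))
        (t * (max hl 0 + max dl 0 + max fl 0) + (max hl 0 + max dl 0)) 1).map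
        (pvLine (max hl 0) (max dl 0) (max hl 0 + max dl 0 + max fl 0))
      = pvTableBlock hl dl t := by
  set H := max hl 0 with hHdef
  set D := max dl 0 with hDdef
  set F := max fl 0 with hFdef
  have hH : 0 ≤ H := le_max_right _ _
  have hD : 0 ≤ D := le_max_right _ _
  have hF : 0 ≤ F := le_max_right _ _
  have hseg := pvLine_seg H D F t 0 (H + D) (by omega) (by omega)
  rw [show t * (H + D + F) + 0 = t * (H + D + F) by ring] at hseg
  rw [hseg]
  rw [PySem.List.pyRange_one_append 0 H (H + D) (by omega) (by omega), List.map_append]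
  unfold pvTableBlock
  rw [pvRange_max hl, pvRange_max dl, ← hHdef, ← hDdef]
  congr 1
  · apply List.map_congr_left
    intro r hr
    obtain ⟨h0, h1⟩ := PySem.List.mem_pyRange_one.mp hr
    rw [if_pos h1]
  · rw [PySem.List.pyRange_one, PySem.List.pyRange_one, List.map_map, List.map_map]
    rw [show (H + D - H).toNat = (D - 0).toNat by omega]
    apply List.map_congr_left
    intro k hk
    have hk' : (k : Int) < D := by have := List.mem_range.mp hk; omega
    simp only [Function.comp]
    rw [if_neg (by omega), if_pos (by omega)]
    rw [show H + (k : Int) - H = 0 + (k : Int) by ring]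

-- the footer segment [t*P+H+D, (t+1)*P) of B is the blank separator
lemma pvSegFoot (hl dl fl t : Int) :
    (PySem.List.pyRange (t * (max hl 0 + max dl 0 + max fl 0) + (max hl 0 + max dl 0))
        (t * (max hl 0 + max dl 0 + max fl 0) + (max hl 0 + max dl 0 + max fl 0)) 1).map
        (pvLine (max hl 0) (max dl 0) (max hl 0 + max dl 0 + max fl 0))
      = List.replicate fl.toNat "" := by
  set H := max hl 0
  set D := max dl 0
  set F := max fl 0
  have hH : 0 ≤ H := le_max_right _ _
  have hD : 0 ≤ D := le_max_right _ _
  have hF : 0 ≤ F := le_max_right _ _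
  rw [pvLine_seg H D F t (H + D) (H + D + F) (by omega) (by omega)]
  rw [show fl.toNat = ((H + D + F) - (H + D)).toNat by omega]
  rw [← PySem.List.length_pyRange_one (H + D) (H + D + F), ← List.map_const']
  apply List.map_congr_left
  intro r hr
  obtain ⟨h0, h1⟩ := PySem.List.mem_pyRange_one.mp hr
  rw [if_neg (by omega), if_neg (by omega)]

-- B's flat list over m+1 tables, by induction on m
lemma pvB_list (hl dl fl : Int) (m : Nat) :
    (PySem.List.pyRange 0 ((m : Int) * (max hl 0 + max dl 0 + max fl 0) + (max hl 0 + max dl 0)) 1).map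
        (pvLine (max hl 0) (max dl 0) (max hl 0 + max dl 0 + max fl 0))
      = pvG hl dl fl m ++ pvTableBlock hl dl (m : Int) := by
  set H := max hl 0 with hHdef
  set D := max dl 0 with hDdef
  set F := max fl 0 with hFdef
  have hH : 0 ≤ H := le_max_right _ _
  have hD : 0 ≤ D := le_max_right _ _
  have hF : 0 ≤ F := le_max_right _ _
  induction m with
  | zero =>
    have hnil : pvG hl dl fl 0 = [] := by
      simp [pvG, PySem.List.pyRange_one_eq_nil]
    rw [hnil, List.nil_append]
    have hb := pvSegBlock hl dl fl 0
    rw [← hHdef, ← hDdef, ← hFdef] at hb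
    simp only [zero_mul, zero_add] at hb
    simp only [Nat.cast_zero, zero_mul, zero_add]
    exact hb
  | succ k ih =>
    have hcast : ((k + 1 : Nat) : Int) = (k : Int) + 1 := by push_cast; ring
    rw [hcast]
    have hsplit1 : PySem.List.pyRange 0 (((k : Int) + 1) * (H + D + F) + (H + D)) 1
        = PySem.List.pyRange 0 ((k : Int) * (H + D + F) + (H + D)) 1
          ++ PySem.List.pyRange ((k : Int) * (H + D + F) + (H + D))
               (((k : Int) + 1) * (H + D + F) + (H + D)) 1 := by
      apply PySem.List.pyRange_one_append <;> [positivity; nlinarith]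
    have hsplit2 : PySem.List.pyRange ((k : Int) * (H + D + F) + (H + D))
               (((k : Int) + 1) * (H + D + F) + (H + D)) 1
        = PySem.List.pyRange ((k : Int) * (H + D + F) + (H + D))
            ((k : Int) * (H + D + F) + (H + D + F)) 1
          ++ PySem.List.pyRange (((k : Int) + 1) * (H + D + F))
               (((k : Int) + 1) * (H + D + F) + (H + D)) 1 := by
      rw [show ((k : Int) + 1) * (H + D + F) = (k : Int) * (H + D + F) + (H + D + F) by ring]
      apply PySem.List.pyRange_one_append <;> omega
    rw [hsplit1, hsplit2, List.map_append, List.map_append, ih]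
    have hfoot := pvSegFoot hl dl fl (k : Int)
    have hblk := pvSegBlock hl dl fl ((k : Int) + 1)
    rw [← hHdef, ← hDdef, ← hFdef] at hfoot hblk
    rw [hfoot, hblk]
    have hG : pvG hl dl fl (k + 1)
        = pvG hl dl fl k ++ (pvTableBlock hl dl (k : Int) ++ List.replicate fl.toNat "") := by
      unfold pvG
      rw [show ((k + 1 : Nat) : Int) = (k : Int) + 1 by push_cast; ring]
      rw [PySem.List.pyRange_one_succ_right (by positivity), List.flatMap_append]
      simp
    rw [hG]
    simp [List.append_assoc]

-- ===== VERDICT (by name: the statement is the Claim_ definition above) =====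
theorem create_multi_table_budget_spec : Claim_equal_create_multi_table_budget := by
  intro nt hl dl fl _
  unfold Spec_create_multi_table_budget
  by_cases hle : nt ≤ 0
  · -- no tables: both programs produce []
    simp only [create_multi_table_budget, create_multi_table_budget_alt]
    rw [PySem.List.pyRange_one_eq_nil hle]
    simp only [List.foldl_nil]
    rw [if_neg (by omega), PySem.List.pyRange_one_eq_nil le_rfl, List.map_nil]
  · obtain ⟨m, hm⟩ : ∃ m : Nat, nt = ((m + 1 : Nat) : Int) :=
      ⟨(nt - 1).toNat, by omega⟩
    subst hm
    rw [pvA_eq]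
    simp only [create_multi_table_budget_alt]
    rw [if_pos (by omega)]
    rw [show ((m + 1 : Nat) : Int) * (max hl 0 + max dl 0)
          + (((m + 1 : Nat) : Int) - 1) * max fl 0
        = (m : Int) * (max hl 0 + max dl 0 + max fl 0) + (max hl 0 + max dl 0) by push_cast; ring]
    rw [pvB_list]
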